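-- pv_equiv track=rewrite | github.com/TekPi2r/reverse-engineering-ctf-writeup | AntiDBG/01/generate.py | compute
-- ===== SOURCE A (Python) =====
-- def compute(param_1):
--     uVar6 = 0
--     while True:
--         if len(param_1) <= uVar6:
--             return param_1
--         for uVar5 in range(len(param_1)):
--             if uVar5 % 2 == 0:
--                 if uVar6 % 2 == 0:
--                     param_1 = param_1[:uVar5] + chr(ord(param_1[uVar5]) + 5) + param_1[uVar5+1:]
--                 else:
--                     param_1 = param_1[:uVar5] + chr(ord(param_1[uVar5]) - 5) + param_1[uVar5+1:]
--             else:
--                 if uVar6 % 2 == 0: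
--                     param_1 = param_1[:uVar5] + chr(ord(param_1[uVar5]) - 5) + param_1[uVar5+1:]
--                 else:
--                     param_1 = param_1[:uVar5] + chr(ord(param_1[uVar5]) + 5) + param_1[uVar5+1:]
--
--         # Comme ptrace renvoie toujours -1, nous sortons immédiatement de la boucle après avoir effectué les transformations
--         break
--
--     return param_1
-- ===== SOURCE B (Python) =====
-- def compute(param_1):
--     # Two-pass by parity: shift even-position chars +5 and odd-position chars -5
--     # in separate slices, then reinterleave.
--     ev = param_1[::2]
--     od = param_1[1::2]
--     ev2 = [chr(ord(c) + 5) for c in ev]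
--     od2 = [chr(ord(c) - 5) for c in od]
--     pairs = [a + b for a, b in zip(ev2, od2)]
--     tail = ev2[len(od2):]  # leftover even char when the length is odd
--     return ''.join(pairs) + ''.join(tail)
-- ===== Notes on version B (the rewrite author's own statement) =====
-- stated objective: alternative
-- what changed: A rebuilds the whole string by slicing at every index in one indexed loop (quadratic); B splits the string into the two parity slices, shifts each slice in its own linear pass, and reinterleaves them.
import Mathlib
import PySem

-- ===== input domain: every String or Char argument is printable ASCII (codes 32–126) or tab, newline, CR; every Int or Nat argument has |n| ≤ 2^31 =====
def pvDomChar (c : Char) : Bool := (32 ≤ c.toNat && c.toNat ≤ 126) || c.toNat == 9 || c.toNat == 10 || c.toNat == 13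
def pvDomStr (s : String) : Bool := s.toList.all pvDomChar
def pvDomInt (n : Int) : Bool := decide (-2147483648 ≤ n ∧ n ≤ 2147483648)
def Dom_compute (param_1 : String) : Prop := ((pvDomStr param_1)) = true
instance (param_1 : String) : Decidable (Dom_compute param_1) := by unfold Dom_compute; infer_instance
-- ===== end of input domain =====

-- B replaces A's single indexed loop (which re-slices the whole string at every
-- index) by two parity slices shifted in separate passes and reinterleaved;
-- objective: alternative decomposition.

-- ===== PORT A =====
-- A's loop body: rebuild the string with position i replaced by the shifted char
-- (uVar6 is the Python outer counter, constantly 0: the while body runs once).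
def pvStepA (uVar6 : Nat) (s : List Char) (i : Nat) : List Char :=
  let c := s.getD i ' '
  if i % 2 = 0 then
    if uVar6 % 2 = 0 then s.take i ++ [Char.ofNat (c.toNat + 5)] ++ s.drop (i + 1)
    else s.take i ++ [Char.ofNat (c.toNat - 5)] ++ s.drop (i + 1)
  else
    if uVar6 % 2 = 0 then s.take i ++ [Char.ofNat (c.toNat - 5)] ++ s.drop (i + 1)
    else s.take i ++ [Char.ofNat (c.toNat + 5)] ++ s.drop (i + 1)

def compute (param_1 : String) : String :=
  let l := param_1.toList
  if l.length ≤ 0 then param_1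
  else String.ofList ((List.range l.length).foldl (pvStepA 0) l)

-- ===== PORT B =====
-- chr(ord(c) + 5) / chr(ord(c) - 5)
def pvUp (c : Char) : Char := Char.ofNat (c.toNat + 5)
def pvDown (c : Char) : Char := Char.ofNat (c.toNat - 5)

-- param_1[::2] and param_1[1::2] (on the tail): every other character.
def pvEveryOther : List Char → List Char
  | [] => []
  | [a] => [a]
  | a :: _ :: r => a :: pvEveryOther r

-- ''.join(a+b for a,b in zip(ev2, od2)): interleave, stopping at the shorter.
def pvZipIl : List Char → List Char → List Char
  | a :: e, b :: o => a :: b :: pvZipIl e o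
  | _, _ => []

def compute_alt (param_1 : String) : String :=
  let ev := pvEveryOther param_1.toList
  let od := pvEveryOther (param_1.toList.drop 1)
  let ev2 := ev.map pvUp
  let od2 := od.map pvDown
  String.ofList (pvZipIl ev2 od2 ++ ev2.drop od2.length)

-- ===== PRECONDITION & SPEC =====
def Spec_compute (param_1 : String) (out : String) : Prop := out = compute_alt param_1
instance (param_1 : String) (out : String) : Decidable (Spec_compute param_1 out) := by unfold Spec_compute; infer_instance

-- ===== CLAIM (what is proved, stated in full; the proofs are below) =====
def Claim_equal_compute : Prop := ∀ (param_1 : String), Dom_compute param_1 → Spec_compute param_1 (compute param_1)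

-- ===== LEMMAS AND PROOFS =====

-- shared specification: +5 on even positions, -5 on odd ones
def pvSpec : List Char → List Char
  | [] => []
  | [a] => [pvUp a]
  | a :: b :: r => pvUp a :: pvDown b :: pvSpec r

def pvShift (i : Nat) (c : Char) : Char := if i % 2 = 0 then pvUp c else pvDown c

lemma pvShift_add_two (i : Nat) (c : Char) : pvShift (i + 2) c = pvShift i c := by
  simp [pvShift, Nat.add_mod_right]

lemma mapIdx_eq_spec (l : List Char) : l.mapIdx pvShift = pvSpec l := by
  induction l using pvSpec.induct with
  | case1 => simp [pvSpec]
  | case2 a => simp [pvSpec, pvShift]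
  | case3 a b r ih =>
    have h2 : (fun i => pvShift (i + 1 + 1)) = pvShift := by
      funext i c; rw [show i + 1 + 1 = i + 2 from rfl, pvShift_add_two]
    simp only [List.mapIdx_cons, pvSpec, h2] at *
    simp [pvShift, ih]

lemma mapIdx_ext {α β : Type} (f g : Nat → α → β) (h : ∀ i c, f i c = g i c)
    (l : List α) : l.mapIdx f = l.mapIdx g := by
  have hfg : f = g := funext fun i => funext fun c => h i c
  rw [hfg]

lemma pvStepA_shift (s : List Char) (i : Nat) :
    pvStepA 0 s i = s.take i ++ [pvShift i (s.getD i ' ')] ++ s.drop (i + 1) := by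
  simp only [pvStepA, pvShift, pvUp, pvDown]
  split_ifs <;> simp_all

lemma foldA_general : ∀ (r done : List Char),
    (List.range' done.length r.length).foldl (pvStepA 0) (done ++ r)
      = done ++ r.mapIdx (fun i c => pvShift (done.length + i) c) := by
  intro r
  induction r with
  | nil => intro done; simp
  | cons c r' ih =>
    intro done
    rw [List.length_cons, List.range'_succ, List.foldl_cons, pvStepA_shift]
    have hget : (done ++ c :: r').getD done.length ' ' = c := by
      simp [List.getD]
    have htake : (done ++ c :: r').take done.length = done := by simp
    have hdrop : (done ++ c :: r').drop (done.length + 1) = r' := by simp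
    rw [hget, htake, hdrop]
    have hassoc : done ++ [pvShift done.length c] ++ r'
        = (done ++ [pvShift done.length c]) ++ r' := by simp
    rw [hassoc]
    have hlen : done.length + 1 = (done ++ [pvShift done.length c]).length := by simp
    rw [hlen, ih (done ++ [pvShift done.length c])]
    simp only [List.mapIdx_cons, List.length_append, List.length_cons, List.length_nil,
      List.append_assoc, List.cons_append, List.nil_append]
    simp only [Nat.add_zero, Nat.zero_add]
    exact congrArg (fun t => done ++ pvShift done.length c :: t) (mapIdx_ext _ _ (fun i x => by rw [show done.length + 1 + i = done.length + (i + 1) from by omega]) r')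

lemma computeA_eq_spec (l : List Char) :
    (List.range l.length).foldl (pvStepA 0) l = pvSpec l := by
  have h := foldA_general l []
  simp only [List.length_nil, List.nil_append] at h
  rw [List.range_eq_range', h, ← mapIdx_eq_spec]
  congr 1
  funext i c
  simp

lemma everyOther_tail (b : Char) (r : List Char) :
    pvEveryOther (b :: r) = b :: pvEveryOther (r.drop 1) := by
  cases r <;> simp [pvEveryOther]

lemma computeB_eq_spec (l : List Char) :
    pvZipIl ((pvEveryOther l).map pvUp) ((pvEveryOther (l.drop 1)).map pvDown)
      ++ ((pvEveryOther l).map pvUp).drop (((pvEveryOther (l.drop 1)).map pvDown).length)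
    = pvSpec l := by
  induction l using pvSpec.induct with
  | case1 => simp [pvEveryOther, pvZipIl, pvSpec]
  | case2 a => simp [pvEveryOther, pvZipIl, pvSpec]
  | case3 a b r ih =>
    rw [show (a :: b :: r).drop 1 = b :: r from rfl,
        show pvEveryOther (a :: b :: r) = a :: pvEveryOther r from rfl,
        everyOther_tail b r]
    simp only [List.map_cons, pvZipIl, List.length_cons, List.drop_succ_cons,
      List.cons_append, pvSpec]
    rw [ih]

lemma toList_empty_of_len (s : String) (h : s.toList.length ≤ 0) : s.toList = [] := by
  cases hl : s.toList with
  | nil => rfl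
  | cons a t => rw [hl] at h; simp at h

-- ===== VERDICT (by name: the statement is the Claim_ definition above) =====
theorem compute_spec : Claim_equal_compute := by
  intro p _
  show compute p = compute_alt p
  unfold compute compute_alt
  simp only []
  split_ifs with h
  · have he : p.toList = [] := toList_empty_of_len p h
    rw [he]
    simp [pvEveryOther, pvZipIl]
    conv_lhs => rw [← String.ofList_toList (s := p), he]
  · rw [computeA_eq_spec, computeB_eq_spec]
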